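-- pv_equiv track=rewrite | github.com/arushi-08/coding | my-folder/1406-subtract-the-product-and-sum-of-digits-of-an-integer/solution.py | productSumDigits
-- ===== SOURCE A (Python) =====
-- def productSumDigits(n):
--     temp_n = n
--     prod = 1
--     sum_digits = 0
--     while temp_n >= 1:
--         prod *= temp_n%10
--         sum_digits += temp_n%10
--         temp_n //= 10
--     return prod, sum_digits
-- ===== SOURCE B (Python) =====
-- def _digits(n):
--     if n < 1:
--         return []
--     return [n % 10] + _digits(n // 10)
--
-- def productSumDigits(n):
--     ds = _digits(n)
--     p = 1
--     for d in ds: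
--         p *= d
--     return p, sum(ds)
-- ===== Notes on version B (the rewrite author's own statement) =====
-- stated objective: alternative
-- what changed: A fuses product and sum into two scalar accumulators inside one while loop; B first extracts the digit list by structural recursion and then performs two separate reductions (a product fold and a sum) over that list.
import Mathlib
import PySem

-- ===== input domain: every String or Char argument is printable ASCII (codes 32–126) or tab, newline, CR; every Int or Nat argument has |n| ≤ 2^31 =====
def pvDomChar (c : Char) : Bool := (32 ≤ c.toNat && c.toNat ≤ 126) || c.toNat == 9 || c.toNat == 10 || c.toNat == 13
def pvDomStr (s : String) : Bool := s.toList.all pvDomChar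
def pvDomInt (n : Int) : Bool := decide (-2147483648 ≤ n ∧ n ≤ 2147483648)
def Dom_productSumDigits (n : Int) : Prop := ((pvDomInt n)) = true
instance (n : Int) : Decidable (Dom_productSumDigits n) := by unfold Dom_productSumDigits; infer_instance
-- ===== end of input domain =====

-- B keeps A's arithmetic but changes the decomposition: it extracts the digit list first
-- (structural recursion), then reduces it twice (product fold and sum). Return values agree on all ints.

-- ===== PORT A =====
-- the while loop of A: two fused accumulators, temp_n //= 10 each step
def pvALoop (t prodAcc sumAcc : Int) : Int × Int :=
  if h : 1 ≤ t then
    pvALoop (PySem.Int.floordiv t 10) (prodAcc * PySem.Int.mod t 10) (sumAcc + PySem.Int.mod t 10)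
  else
    (prodAcc, sumAcc)
termination_by t.toNat
decreasing_by
  have h10 : PySem.Int.floordiv t 10 = t / 10 := PySem.Int.floordiv_eq_ediv_of_pos (by omega)
  rw [h10]; omega

def productSumDigits (n : Int) : Int × Int := pvALoop n 1 0

-- ===== PORT B =====
-- _digits: recursive digit extraction (least significant first)
def pvDigits (t : Int) : List Int :=
  if h : 1 ≤ t then
    PySem.Int.mod t 10 :: pvDigits (PySem.Int.floordiv t 10)
  else
    []
termination_by t.toNat
decreasing_by
  have h10 : PySem.Int.floordiv t 10 = t / 10 := PySem.Int.floordiv_eq_ediv_of_pos (by omega)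
  rw [h10]; omega

def productSumDigits_alt (n : Int) : Int × Int :=
  ((pvDigits n).foldl (· * ·) 1, (pvDigits n).sum)

-- ===== PRECONDITION & SPEC =====
def Spec_productSumDigits (n : Int) (out : Int × Int) : Prop := out = productSumDigits_alt n
instance (n : Int) (out : Int × Int) : Decidable (Spec_productSumDigits n out) := by unfold Spec_productSumDigits; infer_instance

-- ===== CLAIM (what is proved, stated in full; the proofs are below) =====
def Claim_equal_productSumDigits : Prop := ∀ (n : Int), Dom_productSumDigits n → Spec_productSumDigits n (productSumDigits n)

-- ===== LEMMAS AND PROOFS =====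
-- loop invariant: A's fused loop equals the two reductions over B's digit list
theorem pvALoop_eq_digits (t p s : Int) :
    pvALoop t p s = ((pvDigits t).foldl (· * ·) p, s + (pvDigits t).sum) := by
  rw [pvALoop, pvDigits]
  split_ifs with h
  · rw [pvALoop_eq_digits]
    simp [List.foldl_cons, List.sum_cons]
    ring
  · simp
termination_by t.toNat
decreasing_by
  have h10 : PySem.Int.floordiv t 10 = t / 10 := PySem.Int.floordiv_eq_ediv_of_pos (by omega)
  rw [h10]; omega

-- ===== VERDICT (by name: the statement is the Claim_ definition above) =====
theorem productSumDigits_spec : Claim_equal_productSumDigits := by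
  intro n _
  unfold Spec_productSumDigits productSumDigits productSumDigits_alt
  rw [pvALoop_eq_digits]
  simp
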